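-- pv_equiv track=rewrite | github.com/dps/aoc | 2018/day23/main.py | cut_box
-- ===== SOURCE A (Python) =====
-- def cut_box(box):
--     boxes = []
--     xext,yext,zext = box[0][1]-box[0][0], box[1][1]-box[1][0], box[2][1]-box[2][0]
--     xext,yext,zext = xext//2,yext//2,zext//2
--     for x in [0, 1]:
--         for y in [0, 1]:
--             for z in [0, 1]:
--                 boxes.append(((box[0][0],box[0][0]+xext) if x == 0 else (box[0][0]+xext,box[0][1]),
--                               (box[1][0],box[1][0]+yext) if y == 0 else (box[1][0]+yext,box[1][1]),
--                               (box[2][0],box[2][0]+zext) if z == 0 else (box[2][0]+zext,box[2][1])))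
--     return boxes
-- ===== SOURCE B (Python) =====
-- def cut_box(box):
--     # Repeated bisection: start from the whole box and make one pass per axis,
--     # replacing every box in the worklist by its two halves along that axis.
--     boxes = [box]
--     for axis in range(3):
--         nxt = []
--         for b in boxes:
--             lo, hi = b[axis]
--             mid = lo + (hi - lo) // 2
--             for half in ((lo, mid), (mid, hi)):
--                 nb = list(b)
--                 nb[axis] = half
--                 nxt.append(tuple(nb))
--         boxes = nxt
--     return boxes
-- ===== Notes on version B (the rewrite author's own statement) =====
-- stated objective: alternative
-- what changed: B subdivides by repeated bisection: a worklist starts with the whole box and one pass per axis replaces each box by its two halves along that axis, instead of A's three nested 0/1 loops enumerating all 8 octants inline with x==0/y==0/z==0 conditionals.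
import Mathlib
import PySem

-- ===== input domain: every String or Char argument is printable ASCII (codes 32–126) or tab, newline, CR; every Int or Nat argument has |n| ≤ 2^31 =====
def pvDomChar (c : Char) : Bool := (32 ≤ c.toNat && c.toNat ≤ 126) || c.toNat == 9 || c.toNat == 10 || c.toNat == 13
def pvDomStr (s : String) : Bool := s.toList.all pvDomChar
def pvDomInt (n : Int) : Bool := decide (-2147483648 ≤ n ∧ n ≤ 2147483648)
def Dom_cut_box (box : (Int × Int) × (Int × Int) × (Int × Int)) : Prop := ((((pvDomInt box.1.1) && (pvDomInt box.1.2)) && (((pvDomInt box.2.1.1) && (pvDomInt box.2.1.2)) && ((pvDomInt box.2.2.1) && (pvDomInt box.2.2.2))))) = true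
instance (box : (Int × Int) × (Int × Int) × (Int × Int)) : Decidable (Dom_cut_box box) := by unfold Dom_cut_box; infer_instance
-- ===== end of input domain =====

-- B subdivides by repeated bisection (a worklist pass per axis) instead of A's
-- three nested 0/1 loops enumerating the 8 octants inline (objective: alternative).

-- ===== PORT A =====
-- Literal port of A: halve each extent with Python floor division, then three
-- nested loops over [0,1] appending one sub-box per (x,y,z), each interval chosen
-- inline by an x==0/y==0/z==0 conditional.
def cut_box (box : (Int × Int) × (Int × Int) × (Int × Int)) : List ((Int × Int) × (Int × Int) × (Int × Int)) :=
  let xext := PySem.Int.floordiv (box.1.2 - box.1.1) 2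
  let yext := PySem.Int.floordiv (box.2.1.2 - box.2.1.1) 2
  let zext := PySem.Int.floordiv (box.2.2.2 - box.2.2.1) 2
  ([0, 1] : List Int).foldl (fun boxes x =>
    ([0, 1] : List Int).foldl (fun boxes y =>
      ([0, 1] : List Int).foldl (fun boxes z =>
        boxes ++ [((if x == 0 then (box.1.1, box.1.1 + xext) else (box.1.1 + xext, box.1.2)),
                   (if y == 0 then (box.2.1.1, box.2.1.1 + yext) else (box.2.1.1 + yext, box.2.1.2)),
                   (if z == 0 then (box.2.2.1, box.2.2.1 + zext) else (box.2.2.1 + zext, box.2.2.2)))])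
        boxes) boxes) []

-- ===== PORT B =====
-- B-side helpers: read / replace the interval of one axis (b[axis]; nb[axis] = half).
def pvGetAxis (b : (Int × Int) × (Int × Int) × (Int × Int)) (axis : Nat) : Int × Int :=
  match axis with
  | 0 => b.1
  | 1 => b.2.1
  | _ => b.2.2

def pvSetAxis (b : (Int × Int) × (Int × Int) × (Int × Int)) (axis : Nat) (half : Int × Int) :
    (Int × Int) × (Int × Int) × (Int × Int) :=
  match axis with
  | 0 => (half, b.2.1, b.2.2)
  | 1 => (b.1, half, b.2.2)
  | _ => (b.1, b.2.1, half)

-- Port of B: worklist starts as [box]; one pass per axis (range(3)) replaces each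
-- box by its two halves along that axis.
def cut_box_alt (box : (Int × Int) × (Int × Int) × (Int × Int)) : List ((Int × Int) × (Int × Int) × (Int × Int)) :=
  (PySem.List.pyRange 0 3 1).foldl (fun boxes axis =>
    boxes.foldl (fun nxt b =>
      let lo := (pvGetAxis b axis.toNat).1
      let hi := (pvGetAxis b axis.toNat).2
      let mid := lo + PySem.Int.floordiv (hi - lo) 2
      ([(lo, mid), (mid, hi)] : List (Int × Int)).foldl (fun nxt half =>
        nxt ++ [pvSetAxis b axis.toNat half]) nxt) []) [box]

-- ===== PRECONDITION & SPEC =====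
def Spec_cut_box (box : (Int × Int) × (Int × Int) × (Int × Int)) (out : List ((Int × Int) × (Int × Int) × (Int × Int))) : Prop := out = cut_box_alt box
instance (box : (Int × Int) × (Int × Int) × (Int × Int)) (out : List ((Int × Int) × (Int × Int) × (Int × Int))) : Decidable (Spec_cut_box box out) := by unfold Spec_cut_box; infer_instance

-- ===== CLAIM (what is proved, stated in full; the proofs are below) =====
def Claim_equal_cut_box : Prop := ∀ (box : (Int × Int) × (Int × Int) × (Int × Int)), Dom_cut_box box → Spec_cut_box box (cut_box box)

-- ===== LEMMAS AND PROOFS =====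
theorem pvRange3 : PySem.List.pyRange 0 3 1 = ([0, 1, 2] : List Int) := by decide

-- ===== VERDICT (by name: the statement is the Claim_ definition above) =====
theorem cut_box_spec : Claim_equal_cut_box := by
  intro box _
  show cut_box box = cut_box_alt box
  simp [cut_box, cut_box_alt, pvRange3, pvGetAxis, pvSetAxis, List.foldl]
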